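-- pv_equiv track=rewrite | github.com/DECO3801-Group-Project/project | Algorithm/inundation2.py | getFirstMin
-- ===== SOURCE A (Python) =====
-- def getFirstMin(array: list[list[int]]) -> tuple[tuple[int, int], int]:
--     minimum = float("inf")
--     i = 0
--     j = 0
--     for row in array:
--         for column, value in enumerate(row):
--             if (value < minimum):
--                 minimum = value
--                 i = array.index(row)
--                 j = column
--
--     return ((i, j), minimum)
-- ===== SOURCE B (Python) =====
-- def getFirstMin(array: list[list[int]]) -> tuple[tuple[int, int], int]:
--     # Stage 1: compute the global minimum value over all cells.
--     m = min(min(row) for row in array if row)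
--     # Stage 2: locate it: first row containing it, then its first column there.
--     r = next(i for i, row in enumerate(array) if m in row)
--     return ((r, array[r].index(m)), m)
-- ===== Notes on version B (the rewrite author's own statement) =====
-- stated objective: alternative
-- what changed: Replaced the stateful nested scan (running minimum plus a list.index re-search of the whole array on every update) by a staged compute-then-locate strategy: first take the global minimum value (min of per-row minima), then find the first row containing it and that value's first column.
-- outside the precondition, e.g. on getFirstMin([[], []]): A returns ((0, 0), inf), B raises ValueError
import Mathlib
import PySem

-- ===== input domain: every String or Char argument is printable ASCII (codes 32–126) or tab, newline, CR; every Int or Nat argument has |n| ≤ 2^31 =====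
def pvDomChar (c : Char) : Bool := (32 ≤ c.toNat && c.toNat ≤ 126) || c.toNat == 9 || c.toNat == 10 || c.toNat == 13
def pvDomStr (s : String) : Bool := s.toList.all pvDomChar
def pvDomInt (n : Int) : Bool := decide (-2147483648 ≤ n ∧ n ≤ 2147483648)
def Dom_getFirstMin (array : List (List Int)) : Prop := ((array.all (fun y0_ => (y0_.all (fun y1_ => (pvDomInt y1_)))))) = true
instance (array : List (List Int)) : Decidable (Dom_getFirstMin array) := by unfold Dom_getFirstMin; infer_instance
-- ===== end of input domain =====

-- B replaces A's stateful nested scan (with its list.index re-search on every new minimum) by a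
-- staged compute-then-locate strategy: global minimum value first, then its first position (objective: alternative).

-- ===== PORT A =====
-- A's state: (minimum, i, j); 'minimum = none' models Python's float('inf') start (any int is < inf).
-- Body of A's inner loop: 'for column, value in enumerate(row): if value < minimum: …'.
-- 'array.index(row)' never fails in A (row ∈ array), so '.getD 0' is exact.
def pvAStep (array : List (List Int)) (row : List Int) (st2 : Option Int × Int × Int)
    (cv : Int × Int) : Option Int × Int × Int :=
  let column := cv.1
  let value := cv.2
  if (match st2.1 with | none => true | some m => decide (value < m)) then
    (some value, (((PySem.List.index? array row).getD 0 : Nat) : Int), column)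
  else st2

def pvARow (array : List (List Int)) (st : Option Int × Int × Int) (row : List Int) :
    Option Int × Int × Int :=
  (PySem.List.enumerate row 0).foldl (pvAStep array row) st

def getFirstMin (array : List (List Int)) : (Int × Int) × Int :=
  let s := array.foldl (pvARow array) (none, 0, 0)
  ((s.2.1, s.2.2), s.1.getD 0)

-- ===== PORT B =====
-- 'next(i for i, row in enumerate(array) if m in row)': first index whose row contains m
-- ('0' is the StopIteration case, excluded by Pre_).
def pvFindRow (m : Int) : List (List Int) → Int → Int
  | [], _ => 0
  | row :: rs, i => if m ∈ row then i else pvFindRow m rs (i + 1)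

def getFirstMin_alt (array : List (List Int)) : (Int × Int) × Int :=
  -- Stage 1: global minimum value (min of per-row minima over non-empty rows).
  -- '.getD 0' only totalises the empty case Python's min raises on (excluded by Pre_).
  let m : Int := (PySem.List.min?
      ((array.filter (fun row => !row.isEmpty)).map
        (fun row => (PySem.List.min? row (fun x => x)).getD 0)) (fun x => x)).getD 0
  -- Stage 2: first row containing m, then m's first column there.
  let r : Int := pvFindRow m array 0
  let row : List Int := (PySem.List.pyGet? array r).getD []
  ((r, (((PySem.List.index? row m).getD 0 : Nat) : Int)), m)

-- ===== PRECONDITION & SPEC =====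
-- Pre_ excludes arrays with no elements at all (empty array or all rows empty): there A
-- returns ((0,0), float('inf')) — a float, not a value of the declared int type — and B raises ValueError.
def Pre_getFirstMin (array : List (List Int)) : Prop := ∃ row ∈ array, row ≠ []
instance (array : List (List Int)) : Decidable (Pre_getFirstMin array) := by unfold Pre_getFirstMin; infer_instance
def pvWitness_getFirstMin : List (List Int) := [[3, 1], [0, 2]]

def Spec_getFirstMin (array : List (List Int)) (out : (Int × Int) × Int) : Prop := out = getFirstMin_alt array
instance (array : List (List Int)) (out : (Int × Int) × Int) : Decidable (Spec_getFirstMin array out) := by unfold Spec_getFirstMin; infer_instance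

-- ===== CLAIM (what is proved, stated in full; the proofs are below) =====
def Claim_equal_getFirstMin : Prop := ∀ (array : List (List Int)), Dom_getFirstMin array → Pre_getFirstMin array → Spec_getFirstMin array (getFirstMin array)

-- ===== LEMMAS AND PROOFS =====

-- (value, row, col) triples of a row starting at column c, and of an array starting at row k.
def rowTrips : List Int → Int → Int → List (Int × Int × Int)
  | [], _, _ => []
  | v :: vs, r, c => (v, r, c) :: rowTrips vs r (c + 1)

def tripsRec : List (List Int) → Int → List (Int × Int × Int)
  | [], _ => []
  | row :: rs, k => rowTrips row k 0 ++ tripsRec rs (k + 1)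

-- running first-minimum-by-value ('comb'), and the state A keeps for it
def comb (b : Option (Int × Int × Int)) (t : Int × Int × Int) : Option (Int × Int × Int) :=
  match b with
  | none => some t
  | some m => if t.1 < m.1 then some t else some m

def best (L : List (Int × Int × Int)) : Option (Int × Int × Int) := L.foldl comb none

def stOf (b : Option (Int × Int × Int)) : Option Int × Int × Int :=
  match b with
  | none => (none, 0, 0)
  | some m => (some m.1, m.2.1, m.2.2)

theorem rowTrips_append_single (xs : List Int) (v : Int) (r : Int) : ∀ c : Int,
    rowTrips (xs ++ [v]) r c = rowTrips xs r c ++ [(v, r, c + xs.length)] := by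
  induction xs with
  | nil => intro c; simp [rowTrips]
  | cons x xs ih => intro c; simp [rowTrips, ih]; ring

theorem tripsRec_append_single (a : List (List Int)) (row : List Int) : ∀ k : Int,
    tripsRec (a ++ [row]) k = tripsRec a k ++ rowTrips row (k + a.length) 0 := by
  induction a with
  | nil => intro k; simp [tripsRec]
  | cons x xs ih => intro k; simp [tripsRec, ih]; ring_nf

theorem mem_rowTrips_of_mem {x : Int} {row : List Int} (hx : x ∈ row) (r : Int) :
    ∀ c : Int, ∃ c', (x, r, c') ∈ rowTrips row r c := by
  induction row with
  | nil => cases hx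
  | cons v vs ih =>
    intro c
    rcases List.mem_cons.1 hx with h | h
    · exact ⟨c, by simp [rowTrips, h]⟩
    · rcases ih h (c + 1) with ⟨c', hc'⟩
      exact ⟨c', by simp [rowTrips, hc']⟩

theorem mem_tripsRec_of_mem {x : Int} {row : List Int} {a : List (List Int)}
    (hrow : row ∈ a) (hx : x ∈ row) : ∀ k : Int, ∃ t ∈ tripsRec a k, t.1 = x := by
  induction a with
  | nil => cases hrow
  | cons y ys ih =>
    intro k
    rcases List.mem_cons.1 hrow with h | h
    · rcases mem_rowTrips_of_mem (h ▸ hx) k 0 with ⟨c', hc'⟩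
      exact ⟨(x, k, c'), by simp [tripsRec, hc'], rfl⟩
    · rcases ih h (k + 1) with ⟨t, ht, htx⟩
      exact ⟨t, by simp [tripsRec, ht], htx⟩

-- values of trips are cell values
theorem val_mem_of_mem_rowTrips {u : Int × Int × Int} {row : List Int} {r : Int} :
    ∀ {c : Int}, u ∈ rowTrips row r c → u.1 ∈ row := by
  induction row with
  | nil => intro c h; cases h
  | cons v vs ih =>
    intro c h
    rcases List.mem_cons.1 h with h | h
    · simp [h]
    · exact List.mem_cons_of_mem _ (ih h)

theorem val_mem_of_mem_tripsRec {u : Int × Int × Int} {a : List (List Int)} :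
    ∀ {k : Int}, u ∈ tripsRec a k → ∃ row ∈ a, u.1 ∈ row := by
  induction a with
  | nil => intro k h; cases h
  | cons row rs ih =>
    intro k h
    rcases List.mem_append.1 h with h | h
    · exact ⟨row, List.mem_cons_self, val_mem_of_mem_rowTrips h⟩
    · rcases ih h with ⟨row', hr', hu⟩
      exact ⟨row', List.mem_cons_of_mem _ hr', hu⟩

theorem foldl_comb_some (ts : List (Int × Int × Int)) : ∀ b : Int × Int × Int,
    ts.foldl comb (some b) = some (ts.foldl (fun b x => if x.1 < b.1 then x else b) b) := by
  induction ts with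
  | nil => intro b; rfl
  | cons x ts ih =>
    intro b
    by_cases h : x.1 < b.1 <;> simp [comb, h, ih]

theorem best_le (L : List (Int × Int × Int)) : ∀ (b : Option (Int × Int × Int)) (m : Int × Int × Int),
    L.foldl comb b = some m →
    (∀ t ∈ L, m.1 ≤ t.1) ∧ (∀ x, b = some x → m.1 ≤ x.1) := by
  induction L with
  | nil =>
    intro b m h
    refine ⟨by simp, ?_⟩
    intro x hx; simp [hx] at h; simp [h]
  | cons t L ih =>
    intro b m h
    have h' : L.foldl comb (comb b t) = some m := h
    rcases ih (comb b t) m h' with ⟨hL, hb⟩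
    have hmt : m.1 ≤ t.1 := by
      cases b with
      | none => exact hb t rfl
      | some x =>
        by_cases hx : t.1 < x.1
        · exact hb t (by simp [comb, hx])
        · have := hb x (by simp [comb, hx])
          omega
    refine ⟨?_, ?_⟩
    · intro u hu
      rcases List.mem_cons.1 hu with h | h
      · exact h ▸ hmt
      · exact hL u h
    · intro x hx
      cases b with
      | none => cases hx
      | some y =>
        cases hx
        by_cases hy : t.1 < x.1
        · have := hb t (by simp [comb, hy]); omega
        · exact hb x (by simp [comb, hy])

theorem foldl_comb_none_iff (L : List (Int × Int × Int)) :
    L.foldl comb none = none ↔ L = [] := by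
  cases L with
  | nil => simp
  | cons t L =>
    simp only [List.foldl_cons]
    have : comb none t = some t := rfl
    rw [this, foldl_comb_some]
    simp

-- list.index of the current row at the moment A updates: the row cannot occur earlier
theorem index_of_not_mem (pre rest : List (List Int)) (row : List Int) (h : row ∉ pre) :
    PySem.List.index? (pre ++ row :: rest) row = some pre.length := by
  rw [PySem.List.index?_eq_some_iff]
  exact ⟨pre, rest, rfl, rfl, h⟩

-- one cell of A's inner loop, against the running best of the processed triples
theorem cell_step (pre rest : List (List Int)) (row : List Int) (v : Int) (c0 : Int)
    (hv : v ∈ row)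
    (L : List (Int × Int × Int))
    (hpre : ∀ row' ∈ pre, ∀ x ∈ row', ∃ t ∈ L, t.1 = x) :
    pvAStep (pre ++ row :: rest) row (stOf (best L)) (c0, v)
      = stOf (comb (best L) (v, (pre.length : Int), c0)) := by
  have hidx : (match best L with | none => True | some m => v < m.1) →
      PySem.List.index? (pre ++ row :: rest) row = some pre.length := by
    intro htrig
    apply index_of_not_mem
    intro hmem
    rcases hpre row hmem v hv with ⟨t, htL, htv⟩
    cases hbl : best L with
    | none =>
      have : L = [] := (foldl_comb_none_iff L).1 hbl
      simp [this] at htL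
    | some m =>
      have hle := (best_le L none m hbl).1 t htL
      rw [hbl] at htrig
      simp only [htv] at hle
      omega
  cases hbl : best L with
  | none =>
    have hi := hidx (by rw [hbl]; trivial)
    rw [PySem.List.index?_eq_idxOf?] at hi
    simp [pvAStep, stOf, comb, hi]
  | some m =>
    by_cases hlt : v < m.1
    · have hi := hidx (by rw [hbl]; exact hlt)
      rw [PySem.List.index?_eq_idxOf?] at hi
      simp [pvAStep, stOf, comb, hi, hlt]
    · simp [pvAStep, stOf, comb, hlt]

-- A's inner loop over the rest of a row
theorem inner (vs : List Int) : ∀ (colsPre : List Int) (pre rest : List (List Int)) (row : List Int),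
    row = colsPre ++ vs →
    (PySem.List.enumerate vs (colsPre.length : Int)).foldl
        (pvAStep (pre ++ row :: rest) row)
        (stOf (best (tripsRec pre 0 ++ rowTrips colsPre (pre.length : Int) 0)))
      = stOf (best (tripsRec pre 0 ++ rowTrips row (pre.length : Int) 0)) := by
  induction vs with
  | nil => intro colsPre pre rest row hrow; simp [hrow, PySem.List.enumerate_nil]
  | cons v vs ih =>
    intro colsPre pre rest row hrow
    rw [PySem.List.enumerate_cons, List.foldl_cons]
    have hv : v ∈ row := by simp [hrow]
    have hpre : ∀ row' ∈ pre, ∀ x ∈ row',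
        ∃ t ∈ tripsRec pre 0 ++ rowTrips colsPre (pre.length : Int) 0, t.1 = x := by
      intro row' hr x hx
      rcases mem_tripsRec_of_mem hr hx 0 with ⟨t, ht, htx⟩
      exact ⟨t, List.mem_append_left _ ht, htx⟩
    rw [cell_step pre rest row v (colsPre.length : Int) hv _ hpre]
    have hcomb : comb (best (tripsRec pre 0 ++ rowTrips colsPre (pre.length : Int) 0))
        (v, (pre.length : Int), (colsPre.length : Int))
        = best (tripsRec pre 0 ++ rowTrips (colsPre ++ [v]) (pre.length : Int) 0) := by
      rw [rowTrips_append_single]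
      simp only [best, ← List.append_assoc, List.foldl_append, List.foldl_cons, List.foldl_nil]
      norm_num
    rw [hcomb]
    have := ih (colsPre ++ [v]) pre rest row (by simp [hrow])
    simpa using this

-- A's outer loop
theorem outer (rest : List (List Int)) : ∀ pre : List (List Int),
    rest.foldl (pvARow (pre ++ rest)) (stOf (best (tripsRec pre 0)))
      = stOf (best (tripsRec (pre ++ rest) 0)) := by
  induction rest with
  | nil => intro pre; simp
  | cons row rest ih =>
    intro pre
    rw [List.foldl_cons]
    have hrowstep : pvARow (pre ++ row :: rest) (stOf (best (tripsRec pre 0))) row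
        = stOf (best (tripsRec (pre ++ [row]) 0)) := by
      unfold pvARow
      have h0 : tripsRec pre 0 ++ rowTrips ([] : List Int) (pre.length : Int) 0
          = tripsRec pre 0 := by simp [rowTrips]
      have := inner row [] pre rest row rfl
      rw [h0] at this
      rw [tripsRec_append_single]
      simpa using this
    rw [hrowstep]
    have := ih (pre ++ [row])
    simpa [List.append_assoc] using this

theorem A_eq_best (array : List (List Int)) :
    array.foldl (pvARow array) (none, 0, 0) = stOf (best (tripsRec array 0)) := by
  have := outer array []
  simpa [tripsRec, best, stOf] using this

-- B-side: the first minimum as a split of the triple list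

theorem foldl_comb_keep (T : List (Int × Int × Int)) : ∀ t : Int × Int × Int,
    (∀ u ∈ T, ¬ u.1 < t.1) → T.foldl comb (some t) = some t := by
  induction T with
  | nil => intro t _; rfl
  | cons u T ih =>
    intro t h
    have hu : ¬ u.1 < t.1 := h u List.mem_cons_self
    simp only [List.foldl_cons, comb, if_neg hu]
    exact ih t (fun v hv => h v (List.mem_cons_of_mem _ hv))

theorem foldl_comb_split (t : Int × Int × Int) (T1 : List (Int × Int × Int)) :
    ∀ (b : Option (Int × Int × Int)) (T2 : List (Int × Int × Int)),
    (∀ u ∈ T1, t.1 < u.1) → (∀ x, b = some x → t.1 < x.1) → (∀ u ∈ T2, ¬ u.1 < t.1) →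
    (T1 ++ t :: T2).foldl comb b = some t := by
  induction T1 with
  | nil =>
    intro b T2 _ hb h2
    have hcb : comb b t = some t := by
      cases b with
      | none => rfl
      | some x => simp [comb, hb x rfl]
    simp only [List.nil_append, List.foldl_cons, hcb]
    exact foldl_comb_keep T2 t h2
  | cons u T1 ih =>
    intro b T2 h1 hb h2
    simp only [List.cons_append, List.foldl_cons]
    refine ih (comb b u) T2 (fun v hv => h1 v (List.mem_cons_of_mem _ hv)) ?_ h2
    intro x hx
    have hu : t.1 < u.1 := h1 u List.mem_cons_self
    cases b with
    | none =>
      have hxu : x = u := by simpa [comb] using hx.symm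
      rw [hxu]; exact hu
    | some y =>
      have hy := hb y rfl
      by_cases hc : u.1 < y.1
      · have hxu : x = u := by simpa [comb, hc] using hx.symm
        rw [hxu]; exact hu
      · have hxy : x = y := by simpa [comb, hc] using hx.symm
        rw [hxy]; exact hy

-- a row containing m splits at m's first occurrence
theorem rowTrips_split {m : Int} {row : List Int} (hm : m ∈ row) (k : Int) : ∀ c0 : Int,
    ∃ T1 T2, rowTrips row k c0
        = T1 ++ (m, k, c0 + (((PySem.List.index? row m).getD 0 : Nat) : Int)) :: T2 ∧
      ∀ u ∈ T1, u.1 ≠ m := by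
  induction row with
  | nil => cases hm
  | cons v vs ih =>
    intro c0
    by_cases hv : v = m
    · subst hv
      refine ⟨[], rowTrips vs k (c0 + 1), ?_, by simp⟩
      rw [PySem.List.index?_cons_self]
      simp [rowTrips]
    · have hm' : m ∈ vs := by
        rcases List.mem_cons.1 hm with h | h
        · exact absurd h.symm hv
        · exact h
      rcases ih hm' (c0 + 1) with ⟨T1, T2, heq, hne⟩
      refine ⟨(v, k, c0) :: T1, T2, ?_, ?_⟩
      · rcases Option.isSome_iff_exists.1 ((PySem.List.index?_isSome_iff vs m).2 hm') with ⟨n, hn⟩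
        rw [rowTrips, heq, PySem.List.index?_cons_of_ne _ hv, hn]
        simp only [List.cons_append, Option.map_some, Option.getD_some]
        push_cast
        ring_nf
      · intro u hu
        rcases List.mem_cons.1 hu with h | h
        · simp [h, hv]
        · exact hne u h

-- the whole array splits at the first occurrence of m, located by pvFindRow
theorem trips_split (m : Int) : ∀ (a : List (List Int)) (k : Int),
    (∃ row ∈ a, m ∈ row) →
    ∃ (j : Nat) (row : List Int) (T1 T2 : List (Int × Int × Int)),
      a[j]? = some row ∧ m ∈ row ∧ pvFindRow m a k = k + j ∧
      tripsRec a k = T1 ++ (m, k + (j : Int), (((PySem.List.index? row m).getD 0 : Nat) : Int)) :: T2 ∧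
      ∀ u ∈ T1, u.1 ≠ m := by
  intro a
  induction a with
  | nil => intro k h; rcases h with ⟨row, h, _⟩; cases h
  | cons row rs ih =>
    intro k hex
    by_cases hm : m ∈ row
    · rcases rowTrips_split hm k 0 with ⟨T1, T2, heq, hne⟩
      refine ⟨0, row, T1, T2 ++ tripsRec rs (k + 1), by simp, hm, by simp [pvFindRow, hm], ?_, hne⟩
      rw [tripsRec, heq]
      simp
    · have hex' : ∃ row' ∈ rs, m ∈ row' := by
        rcases hex with ⟨row', hr', hm'⟩
        rcases List.mem_cons.1 hr' with h | h
        · exact absurd (h ▸ hm') hm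
        · exact ⟨row', h, hm'⟩
      rcases ih (k + 1) hex' with ⟨j, row', T1, T2, hget, hm', hfind, heq, hne⟩
      refine ⟨j + 1, row', rowTrips row k 0 ++ T1, T2, by simpa using hget, hm', ?_, ?_, ?_⟩
      · rw [pvFindRow, if_neg hm, hfind]; push_cast; ring
      · rw [tripsRec, heq]
        simp only [List.append_assoc, List.cons_append]
        congr 3
        push_cast
        ring
      · intro u hu
        rcases List.mem_append.1 hu with h | h
        · have := val_mem_of_mem_rowTrips h
          intro he; exact hm (he ▸ this)
        · exact hne u h

-- ===== VERDICT (by name: the statement is the Claim_ definition above) =====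
theorem getFirstMin_spec : Claim_equal_getFirstMin := by
  intro array _ hpre
  unfold Spec_getFirstMin getFirstMin getFirstMin_alt
  rw [A_eq_best]
  -- B's stage-1 value
  set M : Int := (PySem.List.min?
      ((array.filter (fun row => !row.isEmpty)).map
        (fun row => (PySem.List.min? row (fun x => x)).getD 0)) (fun x => x)).getD 0 with hM
  -- M is the minimum of some non-empty row's minimum list
  have hmins : ∃ v, PySem.List.min?
      ((array.filter (fun row => !row.isEmpty)).map
        (fun row => (PySem.List.min? row (fun x => x)).getD 0)) (fun x => x) = some v := by
    rcases hpre with ⟨row, hrow, hne⟩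
    have hmem : row ∈ array.filter (fun row => !row.isEmpty) := by
      simp [List.mem_filter, hrow, hne]
    have : ((array.filter (fun row => !row.isEmpty)).map
        (fun row => (PySem.List.min? row (fun x => x)).getD 0)) ≠ [] := by
      simp only [ne_eq, List.map_eq_nil_iff]
      intro h; rw [h] at hmem; cases hmem
    cases hvv : PySem.List.min?
        ((array.filter (fun row => !row.isEmpty)).map
          (fun row => (PySem.List.min? row (fun x => x)).getD 0)) (fun x => x) with
    | none => exact absurd ((PySem.List.min?_eq_none_iff _ _).1 hvv) this
    | some v => exact ⟨v, rfl⟩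
  rcases hmins with ⟨v, hv⟩
  have hMv : M = v := by rw [hM, hv]; rfl
  -- M occurs in some row
  have hex : ∃ row ∈ array, M ∈ row := by
    have hvmem := PySem.List.min?_mem hv
    rcases List.mem_map.1 hvmem with ⟨row, hrowf, hrm⟩
    rcases List.mem_filter.1 hrowf with ⟨hrow, hne⟩
    have hne' : row ≠ [] := by simpa using hne
    have hsome : ∃ w, PySem.List.min? row (fun x => x) = some w := by
      cases hw : PySem.List.min? row (fun x => x) with
      | none => exact absurd ((PySem.List.min?_eq_none_iff _ _).1 hw) hne'
      | some w => exact ⟨w, rfl⟩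
    rcases hsome with ⟨w, hw⟩
    have hwv : w = v := by rw [hw] at hrm; simpa using hrm
    exact ⟨row, hrow, by rw [hMv, ← hwv]; exact PySem.List.min?_mem hw⟩
  -- M is a lower bound on every cell value
  have hlb : ∀ row ∈ array, ∀ x ∈ row, M ≤ x := by
    intro row hrow x hx
    have hne' : row ≠ [] := by rintro rfl; cases hx
    have hsome : ∃ w, PySem.List.min? row (fun x => x) = some w := by
      cases hw : PySem.List.min? row (fun x => x) with
      | none => exact absurd ((PySem.List.min?_eq_none_iff _ _).1 hw) hne'
      | some w => exact ⟨w, rfl⟩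
    rcases hsome with ⟨w, hw⟩
    have hwx : w ≤ x := PySem.List.min?_isMin hw x hx
    have hrowf : row ∈ array.filter (fun row => !row.isEmpty) := by
      simp [List.mem_filter, hrow, hne']
    have hwm : w ∈ (array.filter (fun row => !row.isEmpty)).map
        (fun row => (PySem.List.min? row (fun x => x)).getD 0) := by
      exact List.mem_map.2 ⟨row, hrowf, by rw [hw]; rfl⟩
    have := PySem.List.min?_isMin hv w hwm
    rw [hMv]; omega
  -- split the triple list at M's first position
  rcases trips_split M array 0 hex with ⟨j, row, T1, T2, hget, hmrow, hfind, heq, hne1⟩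
  -- lower bound transported to the triples
  have hlbT : ∀ u ∈ tripsRec array 0, M ≤ u.1 := by
    intro u hu
    rcases val_mem_of_mem_tripsRec hu with ⟨row', hr', hv'⟩
    exact hlb row' hr' u.1 hv'
  -- compute best
  have hbest : best (tripsRec array 0)
      = some (M, (0 : Int) + (j : Int), (((PySem.List.index? row M).getD 0 : Nat) : Int)) := by
    rw [best, heq]
    apply foldl_comb_split
    · intro u hu
      have hmem : u ∈ tripsRec array 0 := by rw [heq]; exact List.mem_append_left _ hu
      have h1 := hlbT u hmem
      have h2 := hne1 u hu
      show (M, (0 : Int) + (j : Int), (((PySem.List.index? row M).getD 0 : Nat) : Int)).1 < u.1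
      simp only
      omega
    · intro x hx; cases hx
    · intro u hu
      have hmem : u ∈ tripsRec array 0 := by
        rw [heq]
        exact List.mem_append_right _ (List.mem_cons_of_mem _ hu)
      have := hlbT u hmem
      show ¬ u.1 < (M, (0 : Int) + (j : Int), (((PySem.List.index? row M).getD 0 : Nat) : Int)).1
      simp only
      omega
  rw [hbest]
  -- B's stage-2 components
  have hr0 : pvFindRow M array 0 = (j : Int) := by rw [hfind]; ring
  have hrowget : (PySem.List.pyGet? array (pvFindRow M array 0)).getD [] = row := by
    rw [hr0, PySem.List.pyGet?_natCast, hget]; rfl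
  simp only [stOf, hr0]
  norm_num
  simp [hget]
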